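-- pv_equiv track=rewrite | github.com/lnbcoder/Bridging-AI-Solutions-Development-Programme | 05_Nesting/C_nesting_loops/remove_first_vowel.py | remove_first_vowel
-- ===== SOURCE A (Python) =====
-- def remove_first_vowel(s):
--     s_list = list(s)
--     vowels = "aeiou"
--
--     for i in range(len(s_list)):
--         if s_list[i] in vowels:
--             s_list.remove(s_list[i])
--             break
--
--     return "".join(s_list)
-- ===== SOURCE B (Python) =====
-- def remove_first_vowel(s):
--     idx = min((s.find(v) for v in "aeiou" if v in s), default=-1)
--     if idx == -1:
--         return s
--     return s[:idx] + s[idx + 1:]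
-- ===== Notes on version B (the rewrite author's own statement) =====
-- stated objective: alternative
-- what changed: Replaces the index loop with list.remove/join by five str.find scans whose minimum gives the first-vowel position, then a slice-and-concatenate deletion.
import Mathlib
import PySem

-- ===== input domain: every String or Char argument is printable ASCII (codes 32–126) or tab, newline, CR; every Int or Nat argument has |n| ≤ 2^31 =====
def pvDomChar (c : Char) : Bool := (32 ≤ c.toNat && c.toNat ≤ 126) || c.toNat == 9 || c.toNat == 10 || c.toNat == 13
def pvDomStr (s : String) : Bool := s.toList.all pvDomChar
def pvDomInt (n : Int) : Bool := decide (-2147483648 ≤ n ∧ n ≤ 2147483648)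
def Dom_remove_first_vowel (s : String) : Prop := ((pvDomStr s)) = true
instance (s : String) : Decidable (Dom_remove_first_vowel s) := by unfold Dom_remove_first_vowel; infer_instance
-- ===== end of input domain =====

-- B replaces A's index loop with list.remove/join by a min over five str.find scans plus a
-- slice-and-concatenate deletion (objective: alternative decomposition, same cost).

-- ===== PORT A =====
-- vowels = "aeiou"; membership of a single char in it is char membership in its characters
def pvVowels : List Char := ['a', 'e', 'i', 'o', 'u']

-- for i in range(len(s_list)): if s_list[i] in vowels: s_list.remove(s_list[i]); break
-- s_list[i] is in range on every iteration, so pyGet? is always `some` and remove? always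
-- succeeds (the element removed was just read from the list); the `none`/getD fallbacks are unreachable.
def pvLoopA (sl : List Char) : List Int → List Char
  | [] => sl
  | i :: rest =>
    match PySem.List.pyGet? sl i with
    | none => sl
    | some c =>
      if c ∈ pvVowels then (PySem.List.remove? sl c).getD sl
      else pvLoopA sl rest

-- "".join(s_list) of one-char strings is exactly the string of the char list
def remove_first_vowel (s : String) : String :=
  String.ofList (pvLoopA s.toList (PySem.List.pyRange 0 (PySem.Chars.len s.toList) 1))

-- ===== PORT B =====
-- idx = min((s.find(v) for v in "aeiou" if v in s), default=-1);
-- if idx == -1: return s; return s[:idx] + s[idx+1:]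
def remove_first_vowel_alt (s : String) : String :=
  let cs := s.toList
  let cands := (pvVowels.filter (fun v => PySem.Chars.isIn [v] cs)).map
    (fun v => PySem.Chars.find cs [v])
  let idx := PySem.List.minD cands (fun x => x) (-1)
  if idx = -1 then s
  else String.ofList (PySem.List.slice cs none (some idx) ++ PySem.List.slice cs (some (idx + 1)) none)

-- ===== PRECONDITION & SPEC =====
def Spec_remove_first_vowel (s : String) (out : String) : Prop := out = remove_first_vowel_alt s
instance (s : String) (out : String) : Decidable (Spec_remove_first_vowel s out) := by unfold Spec_remove_first_vowel; infer_instance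

-- ===== CLAIM (what is proved, stated in full; the proofs are below) =====
def Claim_equal_remove_first_vowel : Prop := ∀ (s : String), Dom_remove_first_vowel s → Spec_remove_first_vowel s (remove_first_vowel s)

-- ===== LEMMAS AND PROOFS =====

-- a one-char substring sits at index i exactly when the char is at index i
theorem pv_singleton_prefix_drop {c : Char} {l : List Char} {i : Nat} :
    [c] <+: l.drop i ↔ l[i]? = some c := by
  rw [← List.head?_drop]
  cases l.drop i <;> simp [eq_comm]

-- erasing the first occurrence deletes exactly index j
theorem pv_erase_eq_take_drop (l : List Char) (j : Nat) (hj : j < l.length)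
    (hlast : ∀ m (hm : m < j), l[m]'(by omega) ≠ l[j]) :
    l.erase l[j] = l.take j ++ l.drop (j + 1) := by
  induction l generalizing j with
  | nil => simp at hj
  | cons x t ih =>
    cases j with
    | zero =>
      simp only [List.getElem_cons_zero, List.erase_cons_head, List.take_zero,
        List.drop_succ_cons, List.drop_zero, List.nil_append]
    | succ j' =>
      have hx : x ≠ (x :: t)[j' + 1] := hlast 0 (by omega)
      simp only [List.getElem_cons_succ] at hx ⊢
      rw [List.erase_cons_tail (by simp only [beq_iff_eq]; exact hx)]
      simp only [List.take_succ_cons, List.drop_succ_cons, List.cons_append, List.cons.injEq,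
        true_and]
      exact ih j' (by simpa using hj) (fun m hm => by
        have := hlast (m + 1) (by omega)
        simpa using this)

-- A's loop, when indices below k hold no vowel and the first vowel is at j ≥ k, removes it
theorem pv_loopA_some (cs : List Char) (j : Nat) (hj : j < cs.length)
    (hv : cs[j] ∈ pvVowels) (hfirst : ∀ m (hm : m < j), cs[m]'(by omega) ∉ pvVowels) :
    ∀ k, k ≤ j →
      pvLoopA cs (PySem.List.pyRange (k : Int) (cs.length : Int) 1) =
        cs.take j ++ cs.drop (j + 1) := by
  intro k hk
  induction hn : j - k generalizing k with
  | zero =>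
    have hkj : k = j := by omega
    subst hkj
    rw [PySem.List.pyRange_one_cons (by exact_mod_cast hj)]
    simp only [pvLoopA, PySem.List.pyGet?_natCast, List.getElem?_eq_getElem hj, hv, if_pos]
    rw [PySem.List.remove?_eq_some_erase cs cs[k] (List.getElem_mem hj)]
    simp [pv_erase_eq_take_drop cs k hj (fun m hm h => hfirst m hm (h ▸ hv))]
  | succ n ih =>
    have hkl : k < cs.length := by omega
    rw [PySem.List.pyRange_one_cons (by exact_mod_cast hkl)]
    simp only [pvLoopA, PySem.List.pyGet?_natCast]
    rw [List.getElem?_eq_getElem hkl]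
    have hnv : cs[k] ∉ pvVowels := hfirst k (by omega)
    simp only [hnv]
    have : ((k : Int) + 1) = ((k + 1 : Nat) : Int) := by push_cast; ring
    rw [this]
    exact ih (k + 1) (by omega) (by omega)

-- A's loop finds nothing when no vowel remains from index k on
theorem pv_loopA_none (cs : List Char) (hnone : ∀ c ∈ cs, c ∉ pvVowels) :
    ∀ k : Nat, pvLoopA cs (PySem.List.pyRange (k : Int) (cs.length : Int) 1) = cs := by
  intro k
  induction hn : cs.length - k generalizing k with
  | zero =>
    rw [PySem.List.pyRange_one_eq_nil (by omega)]
    rfl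
  | succ n ih =>
    have hkl : k < cs.length := by omega
    rw [PySem.List.pyRange_one_cons (by exact_mod_cast hkl)]
    simp only [pvLoopA, PySem.List.pyGet?_natCast]
    rw [List.getElem?_eq_getElem hkl]
    have hnv : cs[k] ∉ pvVowels := hnone _ (List.getElem_mem hkl)
    simp only [hnv]
    have : ((k : Int) + 1) = ((k + 1 : Nat) : Int) := by push_cast; ring
    rw [this]
    exact ih (k + 1) (by omega)

-- find of a single char present in cs, when j is the first index of a vowel and the char is
-- cs[j] itself, returns exactly j
theorem pv_find_single (cs : List Char) (v : Char) (j : Nat) (hj : j < cs.length)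
    (hat : cs[j] = v) (hbefore : ∀ m (hm : m < j), cs[m]'(by omega) ≠ v) :
    PySem.Chars.find cs [v] = (j : Int) := by
  have hin : [v] <:+: cs :=
    List.infix_iff_prefix_suffix.2 ⟨cs.drop j, pv_singleton_prefix_drop.2
      (by rw [List.getElem?_eq_getElem hj, hat]), List.drop_suffix _ _⟩
  have hpos : 0 ≤ PySem.Chars.find cs [v] := (PySem.Chars.find_nonneg_iff cs [v]).2 hin
  obtain ⟨hpre, hmin⟩ := PySem.Chars.find_spec hpos
  set t := (PySem.Chars.find cs [v]).toNat with ht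
  have hteq : cs[t]? = some v := pv_singleton_prefix_drop.1 hpre
  have htlt : t < cs.length := (List.getElem?_eq_some_iff.1 hteq).1
  have htv : cs[t] = v := by
    have := List.getElem?_eq_getElem htlt
    rw [this] at hteq; exact Option.some.inj hteq
  have h1 : ¬ j < t := fun h => hmin j h (pv_singleton_prefix_drop.2
    (by rw [List.getElem?_eq_getElem hj, hat]))
  have h2 : ¬ t < j := fun h => hbefore t h htv
  have : t = j := by omega
  omega

-- ===== VERDICT (by name: the statement is the Claim_ definition above) =====
theorem remove_first_vowel_spec : Claim_equal_remove_first_vowel := by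
  intro s _
  unfold Spec_remove_first_vowel remove_first_vowel remove_first_vowel_alt
  simp only []
  set cs := s.toList with hcs
  cases hfi : List.findIdx? (fun c => decide (c ∈ pvVowels)) cs with
  | none =>
    have hnone : ∀ c ∈ cs, c ∉ pvVowels := by
      intro c hc
      have := List.findIdx?_eq_none_iff.1 hfi c hc
      simpa using this
    have hA : pvLoopA cs (PySem.List.pyRange 0 (PySem.Chars.len cs) 1) = cs := by
      have h0 := pv_loopA_none cs hnone 0
      simpa [PySem.Chars.len] using h0
    have hfil : pvVowels.filter (fun v => PySem.Chars.isIn [v] cs) = [] := by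
      rw [List.filter_eq_nil_iff]
      intro v hv
      simp only [Bool.not_eq_true]
      cases h : PySem.Chars.isIn [v] cs with
      | false => rfl
      | true =>
        exact absurd hv
          (hnone v ((List.singleton_infix_iff v cs).1 ((PySem.Chars.isIn_iff_infix [v] cs).1 h)))
    rw [hA, hfil]
    simp only [List.map_nil, PySem.List.minD, PySem.List.min?, List.foldl_nil, Option.getD_none,
      if_pos]
    exact String.ofList_toList
  | some j =>
    obtain ⟨hj, hvb, hfirstb⟩ := List.findIdx?_eq_some_iff_getElem.1 hfi
    have hv : cs[j] ∈ pvVowels := by simpa using hvb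
    have hfirst : ∀ m (hm : m < j), cs[m]'(by omega) ∉ pvVowels := fun m hm => by
      have := hfirstb m hm
      simpa using this
    have hA : pvLoopA cs (PySem.List.pyRange 0 (PySem.Chars.len cs) 1) =
        cs.take j ++ cs.drop (j + 1) := by
      have h0 := pv_loopA_some cs j hj hv hfirst 0 (Nat.zero_le _)
      simpa [PySem.Chars.len] using h0
    have hfind0 : PySem.Chars.find cs [cs[j]] = (j : Int) :=
      pv_find_single cs cs[j] j hj rfl (fun m hm h => hfirst m hm (h ▸ hv))
    have hmemf : cs[j] ∈ pvVowels.filter (fun v => PySem.Chars.isIn [v] cs) := by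
      rw [List.mem_filter]
      refine ⟨hv, ?_⟩
      rw [PySem.Chars.isIn_iff_infix]
      exact (List.singleton_infix_iff cs[j] cs).2 (List.getElem_mem hj)
    have hmemc : (j : Int) ∈ (pvVowels.filter (fun v => PySem.Chars.isIn [v] cs)).map
        (fun v => PySem.Chars.find cs [v]) := List.mem_map.2 ⟨cs[j], hmemf, hfind0⟩
    have hle : ∀ x ∈ (pvVowels.filter (fun v => PySem.Chars.isIn [v] cs)).map
        (fun v => PySem.Chars.find cs [v]), (j : Int) ≤ x := by
      intro x hx
      obtain ⟨v, hvf, hfx⟩ := List.mem_map.1 hx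
      obtain ⟨hvv, hvin⟩ := List.mem_filter.1 hvf
      have hinf := (PySem.Chars.isIn_iff_infix [v] cs).1 hvin
      have hpos : 0 ≤ PySem.Chars.find cs [v] := (PySem.Chars.find_nonneg_iff cs [v]).2 hinf
      obtain ⟨hpre, _⟩ := PySem.Chars.find_spec hpos
      have hteq : cs[(PySem.Chars.find cs [v]).toNat]? = some v := pv_singleton_prefix_drop.1 hpre
      have htlt : (PySem.Chars.find cs [v]).toNat < cs.length := (List.getElem?_eq_some_iff.1 hteq).1
      have htv : cs[(PySem.Chars.find cs [v]).toNat]'htlt = v := by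
        have := List.getElem?_eq_getElem htlt
        rw [this] at hteq
        exact Option.some.inj hteq
      have hnotlt : ¬ (PySem.Chars.find cs [v]).toNat < j :=
        fun h => hfirst _ h (by rw [htv]; exact hvv)
      omega
    have hmin : PySem.List.minD ((pvVowels.filter (fun v => PySem.Chars.isIn [v] cs)).map
        (fun v => PySem.Chars.find cs [v])) (fun x => x) (-1) = (j : Int) := by
      have hnil : (pvVowels.filter (fun v => PySem.Chars.isIn [v] cs)).map
          (fun v => PySem.Chars.find cs [v]) ≠ [] := List.ne_nil_of_mem hmemc
      have h1 := PySem.List.minD_mem _ (fun x : Int => x) (-1) hnil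
      have h2 := PySem.List.key_minD_le _ (fun x : Int => x) (-1) hnil _ hmemc
      have h3 := hle _ h1
      exact le_antisymm h2 h3
    rw [hA, hmin]
    have hne : ¬ ((j : Int) = -1) := by omega
    rw [if_neg hne]
    rw [PySem.List.slice_to_natCast]
    have hcast : ((j : Int) + 1) = ((j + 1 : Nat) : Int) := by push_cast; ring
    rw [hcast, PySem.List.slice_from_natCast]
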